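-- pv_equiv track=rewrite | github.com/quinlan-lab/kmertools | eskedit/dpgp_prep.py | get_clean_seq
-- ===== SOURCE A (Python) =====
-- def get_clean_seq(seq):
--     """
--     Collapse long stretches of N in a sequence
--     :param seq: string or iterable representation of the sequence
--     :return: tuple(a list containing the original sequence with 'N's collapsed and counted, total number of 'N's)
--     """
--     total_n = 0
--     ncount = 0
--     new_seq = []
--     for i, n in enumerate(seq):
--         if n.upper() == 'N':
--             ncount += 1
--             continue
--         else:
--             if ncount > 0:
--                 new_seq.append(str(ncount) + 'N')
--                 total_n += ncount
--                 ncount = 0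
--             new_seq.append(n)
--     return new_seq, total_n
-- ===== SOURCE B (Python) =====
-- def _groups(seq):
--     # split seq into maximal runs of equal "is this an N (case-insensitive)" key
--     s = list(seq)
--     groups = []
--     i = 0
--     while i < len(s):
--         k = s[i].upper() == 'N'
--         j = i + 1
--         while j < len(s) and (s[j].upper() == 'N') == k:
--             j += 1
--         groups.append((k, s[i:j]))
--         i = j
--     return groups
--
--
-- def get_clean_seq(seq):
--     new_seq = []
--     total_n = 0
--     pending = 0
--     for is_n, run in _groups(seq):
--         if is_n:
--             pending = len(run)
--         else:
--             if pending > 0: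
--                 new_seq.append(str(pending) + 'N')
--                 total_n += pending
--                 pending = 0
--             new_seq.extend(run)
--     return new_seq, total_n
-- ===== Notes on version B (the rewrite author's own statement) =====
-- stated objective: idiomatic
-- what changed: B first splits the sequence into maximal case-insensitive N/non-N runs (a group-by pass) and then folds over whole runs with a pending N-count, instead of A's char-at-a-time loop interleaving counting and flushing.
import Mathlib
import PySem

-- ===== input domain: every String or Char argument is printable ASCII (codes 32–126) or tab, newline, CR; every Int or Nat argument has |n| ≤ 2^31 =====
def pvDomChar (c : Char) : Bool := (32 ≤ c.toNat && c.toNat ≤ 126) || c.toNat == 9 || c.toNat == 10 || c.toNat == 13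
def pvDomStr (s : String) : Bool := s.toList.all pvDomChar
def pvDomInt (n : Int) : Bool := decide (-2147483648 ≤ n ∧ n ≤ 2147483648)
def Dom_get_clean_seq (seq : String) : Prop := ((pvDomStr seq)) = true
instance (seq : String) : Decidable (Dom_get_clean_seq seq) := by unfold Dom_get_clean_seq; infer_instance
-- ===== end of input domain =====

-- B splits the sequence into maximal case-insensitive N / non-N runs first, then folds over
-- the runs with a pending N-count (objective: simpler decomposition; return value identical).

-- ===== PORT A =====
-- one char at a time, state (new_seq, total_n, ncount), exactly A's loop body
def pvStepA (st : List String × Int × Int) (c : Char) : List String × Int × Int :=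
  let ns := st.1; let t := st.2.1; let nc := st.2.2
  if c.toUpper == 'N' then (ns, t, nc + 1)
  else if nc > 0 then
    (ns ++ [String.ofList (PySem.Int.toChars nc ++ ['N']), String.ofList [c]], t + nc, 0)
  else (ns ++ [String.ofList [c]], t, nc)

def get_clean_seq (seq : String) : List String × Int :=
  let r := seq.toList.foldl pvStepA ([], 0, 0)
  (r.1, r.2.1)

-- ===== PORT B =====
-- maximal runs of equal key (key = "is an N, case-insensitive"), as in Source B's _groups
def pvGroups (l : List Char) : List (Bool × List Char) :=
  match l with
  | [] => []
  | c :: cs =>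
    (c.toUpper == 'N',
      c :: cs.takeWhile (fun d => (d.toUpper == 'N') == (c.toUpper == 'N'))) ::
      pvGroups (cs.dropWhile (fun d => (d.toUpper == 'N') == (c.toUpper == 'N')))
termination_by l.length
decreasing_by
  simp only [List.length_cons]
  exact Nat.lt_succ_of_le (List.length_dropWhile_le _ _)

def pvStepB (st : List String × Int × Int) (g : Bool × List Char) : List String × Int × Int :=
  let ns := st.1; let t := st.2.1; let p := st.2.2
  if g.1 then (ns, t, (g.2.length : Int))
  else
    let f := if p > 0 then (ns ++ [String.ofList (PySem.Int.toChars p ++ ['N'])], t + p)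
             else (ns, t)
    (f.1 ++ g.2.map (fun c => String.ofList [c]), f.2, 0)

def get_clean_seq_alt (seq : String) : List String × Int :=
  let r := (pvGroups seq.toList).foldl pvStepB ([], 0, 0)
  (r.1, r.2.1)

-- ===== PRECONDITION & SPEC =====
def Spec_get_clean_seq (seq : String) (out : List String × Int) : Prop := out = get_clean_seq_alt seq
instance (seq : String) (out : List String × Int) : Decidable (Spec_get_clean_seq seq out) := by unfold Spec_get_clean_seq; infer_instance

-- ===== CLAIM (what is proved, stated in full; the proofs are below) =====
def Claim_equal_get_clean_seq : Prop := ∀ (seq : String), Dom_get_clean_seq seq → Spec_get_clean_seq seq (get_clean_seq seq)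

-- ===== LEMMAS AND PROOFS =====

-- A's fold over a run of N-chars just bumps the counter
theorem pv_foldA_nrun (g : List Char) (ns : List String) (t p : Int)
    (h : ∀ c ∈ g, (c.toUpper == 'N') = true) :
    g.foldl pvStepA (ns, t, p) = (ns, t, p + g.length) := by
  induction g generalizing p with
  | nil => simp
  | cons c cs ih =>
    have hc := h c (List.mem_cons_self ..)
    simp only [List.foldl_cons, pvStepA, hc, if_pos]
    rw [ih _ (fun d hd => h d (List.mem_cons_of_mem _ hd))]
    simp only [List.length_cons]
    refine congrArg (Prod.mk ns) (congrArg (Prod.mk t) ?_)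
    push_cast
    ring

-- A's fold over a run of non-N chars from counter 0 appends the singletons
theorem pv_foldA_plainrun (g : List Char) (ns : List String) (t : Int)
    (h : ∀ c ∈ g, (c.toUpper == 'N') = false) :
    g.foldl pvStepA (ns, t, 0) = (ns ++ g.map (fun c => String.ofList [c]), t, 0) := by
  induction g generalizing ns with
  | nil => simp
  | cons c cs ih =>
    have hc := h c (List.mem_cons_self ..)
    simp only [List.foldl_cons, pvStepA, hc]
    norm_num
    rw [ih _ (fun d hd => h d (List.mem_cons_of_mem _ hd))]
    simp

def pvHeadOk (l : List Char) (p : Int) : Prop :=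
  0 ≤ p ∧ (p = 0 ∨ (match l with | [] => True | c :: _ => (c.toUpper == 'N') = false))

-- main: A's char-fold equals B's group-fold; the pending count is nonnegative and
-- is 0 whenever the list starts with an N
theorem pv_main (l : List Char) (ns : List String) (t p : Int) (h : pvHeadOk l p) :
    l.foldl pvStepA (ns, t, p) = (pvGroups l).foldl pvStepB (ns, t, p) := by
  match l with
  | [] => simp [pvGroups]
  | c :: cs =>
    rw [pvGroups]
    have hsplit : cs = cs.takeWhile (fun d => (d.toUpper == 'N') == (c.toUpper == 'N'))
        ++ cs.dropWhile (fun d => (d.toUpper == 'N') == (c.toUpper == 'N')) :=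
      (List.takeWhile_append_dropWhile).symm
    conv_lhs => rw [show c :: cs
        = (c :: cs.takeWhile (fun d => (d.toUpper == 'N') == (c.toUpper == 'N')))
          ++ cs.dropWhile (fun d => (d.toUpper == 'N') == (c.toUpper == 'N')) from by
      rw [List.cons_append, ← hsplit]]
    rw [List.foldl_append]
    by_cases hk : (c.toUpper == 'N') = true
    · -- N-run: p = 0 by hypothesis
      have hp : p = 0 := by
        rcases h.2 with h2 | h2
        · exact h2
        · rw [h2] at hk; cases hk
      subst hp
      have hall : ∀ d ∈ c :: cs.takeWhile (fun d => (d.toUpper == 'N') == (c.toUpper == 'N')),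
          (d.toUpper == 'N') = true := by
        intro d hd
        rcases List.mem_cons.mp hd with h1 | h1
        · subst h1; exact hk
        · have h2 := List.mem_takeWhile_imp h1
          rw [hk] at h2
          simpa using h2
      rw [pv_foldA_nrun _ _ _ _ hall]
      rw [List.foldl_cons]
      simp only [pvStepB, hk, if_pos]
      have hhead : pvHeadOk
          (cs.dropWhile (fun d => (d.toUpper == 'N') == (c.toUpper == 'N')))
          ((0:Int) + (c :: cs.takeWhile (fun d => (d.toUpper == 'N') == (c.toUpper == 'N'))).length) := by
        refine ⟨by positivity, ?_⟩
        right
        cases hdw : cs.dropWhile (fun d => (d.toUpper == 'N') == (c.toUpper == 'N')) with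
        | nil => trivial
        | cons d ds =>
          have h2 := List.head?_dropWhile_not
            (fun d => (d.toUpper == 'N') == (c.toUpper == 'N')) cs
          rw [hdw] at h2
          rw [hk] at h2
          simpa using h2
      rw [hk] at hhead
      rw [pv_main _ _ _ _ hhead]
      norm_num
    · -- non-N run
      have hk' : (c.toUpper == 'N') = false := by simpa using hk
      have h0 : 0 ≤ p := h.1
      have hallp : ∀ d ∈ cs.takeWhile (fun d => (d.toUpper == 'N') == (c.toUpper == 'N')),
          (d.toUpper == 'N') = false := by
        intro d hd
        have h2 := List.mem_takeWhile_imp hd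
        rw [hk'] at h2
        simpa using h2
      rw [List.foldl_cons]
      have hstep : pvStepA (ns, t, p) c =
          ((if p > 0 then (ns ++ [String.ofList (PySem.Int.toChars p ++ ['N'])], t + p)
            else (ns, t)).1 ++ [String.ofList [c]],
           (if p > 0 then (ns ++ [String.ofList (PySem.Int.toChars p ++ ['N'])], t + p)
            else (ns, t)).2, 0) := by
        simp only [pvStepA, hk']
        by_cases hp : p > 0
        · simp [hp]
        · simp [hp]
          omega
      rw [hstep]
      rw [pv_foldA_plainrun _ _ _ hallp]
      rw [List.foldl_cons]
      simp only [pvStepB, hk', Bool.false_eq_true, if_false]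
      have hhead : pvHeadOk
          (cs.dropWhile (fun d => (d.toUpper == 'N') == (c.toUpper == 'N'))) 0 :=
        ⟨le_refl 0, Or.inl rfl⟩
      rw [hk'] at hhead
      rw [pv_main _ _ _ _ hhead]
      simp
termination_by l.length
decreasing_by
  all_goals
    simp only [List.length_cons]
    exact Nat.lt_succ_of_le (List.length_dropWhile_le _ _)

-- ===== VERDICT (by name: the statement is the Claim_ definition above) =====
theorem get_clean_seq_spec : Claim_equal_get_clean_seq := by
  intro seq _
  unfold Spec_get_clean_seq get_clean_seq get_clean_seq_alt
  rw [pv_main seq.toList [] 0 0 ⟨le_refl 0, Or.inl rfl⟩]
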